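-- pv_equiv track=rewrite | github.com/pypi-data/pypi-mirror-293 | packages/efj-parser/efj_parser-0.9.2.tar.gz/efj_parser-0.9.2/efj_parser/__init__.py | _process_class_override
-- ===== SOURCE A (Python) =====
-- def _process_class_override(
--         flags: tuple[str, ...]
-- ) -> tuple[str, tuple[str, ...]]:
--     retval = ""
--     unused = []
--     for f in flags:
--         if f in {"spse", "spme", "mc"}:
--             retval = f
--         else:
--             unused.append(f)
--     return retval, tuple(unused)
-- ===== SOURCE B (Python) =====
-- _CLASS_FLAGS = {"spse", "spme", "mc"}
--
--
-- def _process_class_override(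
--         flags: tuple[str, ...]
-- ) -> tuple[str, tuple[str, ...]]:
--     retval = next((f for f in reversed(flags) if f in _CLASS_FLAGS), "")
--     unused = tuple(f for f in flags if f not in _CLASS_FLAGS)
--     return retval, unused
-- ===== Notes on version B (the rewrite author's own statement) =====
-- stated objective: simpler
-- what changed: Replaces the single accumulating loop with two independent passes: a backward short-circuiting search for the last class flag and a filter for the unused flags.
import Mathlib
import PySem

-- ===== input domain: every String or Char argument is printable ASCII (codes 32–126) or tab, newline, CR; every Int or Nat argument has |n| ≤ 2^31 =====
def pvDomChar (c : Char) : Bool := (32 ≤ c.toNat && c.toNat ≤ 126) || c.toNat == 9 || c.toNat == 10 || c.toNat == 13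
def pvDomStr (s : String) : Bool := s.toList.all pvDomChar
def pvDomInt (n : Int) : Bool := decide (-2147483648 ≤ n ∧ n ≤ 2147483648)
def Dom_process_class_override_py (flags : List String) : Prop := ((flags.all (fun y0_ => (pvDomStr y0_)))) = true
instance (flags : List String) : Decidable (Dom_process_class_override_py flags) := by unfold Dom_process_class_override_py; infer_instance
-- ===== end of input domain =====

-- B replaces A's single accumulating loop by two independent passes (a backward
-- short-circuit search for the last class flag, and a filter for the unused flags): simpler decomposition.

-- ===== PORT A =====
-- the Python set literal {"spse","spme","mc"} as a membership test
def pvIsClassFlag (f : String) : Bool := f == "spse" || f == "spme" || f == "mc"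

-- A: one loop accumulating (retval, unused)
def process_class_override_py (flags : List String) : String × List String :=
  flags.foldl (fun st f =>
    if pvIsClassFlag f then (f, st.2) else (st.1, st.2 ++ [f])) ("", [])

-- ===== PORT B =====
-- B: next((f for f in reversed(flags) if f in CLS), "") and a filter pass
def process_class_override_py_alt (flags : List String) : String × List String :=
  ((flags.reverse.find? pvIsClassFlag).getD "",
   flags.filter (fun f => !pvIsClassFlag f))

-- ===== PRECONDITION & SPEC =====
def Spec_process_class_override_py (flags : List String) (out : String × List String) : Prop := out = process_class_override_py_alt flags
instance (flags : List String) (out : String × List String) : Decidable (Spec_process_class_override_py flags out) := by unfold Spec_process_class_override_py; infer_instance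

-- ===== CLAIM (what is proved, stated in full; the proofs are below) =====
def Claim_equal_process_class_override_py : Prop := ∀ (flags : List String), Dom_process_class_override_py flags → Spec_process_class_override_py flags (process_class_override_py flags)

-- ===== LEMMAS AND PROOFS =====

-- ===== VERDICT (by name: the statement is the Claim_ definition above) =====
-- loop invariant: A's fold from state (r, u) is the last class flag (default r)
-- paired with u ++ the non-class flags
theorem pv_fold_inv (t : List String) (r : String) (u : List String) :
    t.foldl (fun st f =>
      if pvIsClassFlag f then (f, st.2) else (st.1, st.2 ++ [f])) (r, u)
    = ((t.reverse.find? pvIsClassFlag).getD r,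
       u ++ t.filter (fun f => !pvIsClassFlag f)) := by
  induction t generalizing r u with
  | nil => simp
  | cons f t ih =>
    simp only [List.foldl_cons, List.reverse_cons, List.find?_append, List.filter_cons]
    by_cases h : pvIsClassFlag f = true
    · simp [h, ih, Option.getD]
    · simp [h, ih, Option.getD]

theorem process_class_override_py_spec : Claim_equal_process_class_override_py := by
  intro flags _
  unfold Spec_process_class_override_py process_class_override_py process_class_override_py_alt
  simpa using pv_fold_inv flags "" []
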